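-- pv_equiv track=rewrite | github.com/pypi-data/pypi-mirror-376 | packages/s11-get-result/s11_get_result-0.0.33-py3-none-any.whl/get_result/resultconverter.py | prepare_block_grid
-- ===== SOURCE A (Python) =====
-- def prepare_block_grid(width, height, blocksize):
--     blocks = []
--     for y0 in range(0, height, blocksize):
--         y1 = min(y0 + blocksize, height)
--         for x0 in range(0, width, blocksize):
--             x1 = min(x0 + blocksize, width)
--             blocks.append((x0, x1, y0, y1))
--     return blocks
-- ===== SOURCE B (Python) =====
-- def prepare_block_grid(width, height, blocksize):
--     nx = len(range(0, width, blocksize))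
--     ny = len(range(0, height, blocksize))
--     blocks = []
--     for k in range(nx * ny):
--         j, i = divmod(k, nx)
--         x0 = i * blocksize
--         y0 = j * blocksize
--         blocks.append((x0, min(x0 + blocksize, width), y0, min(y0 + blocksize, height)))
--     return blocks
-- ===== Notes on version B (the rewrite author's own statement) =====
-- stated objective: alternative
-- what changed: B replaces A's nested y/x loops by one flat loop over a single index k in range(nx*ny), recovering the row and column from k by divmod and computing each block's coordinates by index arithmetic.
import Mathlib
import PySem

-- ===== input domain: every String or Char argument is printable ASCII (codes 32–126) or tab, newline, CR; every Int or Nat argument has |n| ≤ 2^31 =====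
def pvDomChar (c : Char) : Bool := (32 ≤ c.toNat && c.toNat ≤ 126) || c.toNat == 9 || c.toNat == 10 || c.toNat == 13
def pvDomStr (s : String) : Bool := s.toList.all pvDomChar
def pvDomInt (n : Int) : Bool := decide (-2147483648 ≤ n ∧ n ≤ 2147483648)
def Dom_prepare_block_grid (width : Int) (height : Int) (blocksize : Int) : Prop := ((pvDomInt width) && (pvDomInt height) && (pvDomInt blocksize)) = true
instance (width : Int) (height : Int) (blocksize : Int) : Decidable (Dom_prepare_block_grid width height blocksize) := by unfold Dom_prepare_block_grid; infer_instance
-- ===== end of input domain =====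

-- B replaces A's nested y/x loops by one flat loop over k in range(nx*ny), recovering row/column via divmod (alternative decomposition, same cost).

-- ===== PORT A =====
def prepare_block_grid (width : Int) (height : Int) (blocksize : Int) : List (Int × Int × Int × Int) :=
  (PySem.List.pyRange 0 height blocksize).foldl (fun blocks y0 =>
    let y1 := min (y0 + blocksize) height
    (PySem.List.pyRange 0 width blocksize).foldl (fun blocks x0 =>
      let x1 := min (x0 + blocksize) width
      blocks ++ [(x0, x1, y0, y1)]) blocks) []

-- ===== PORT B =====
def prepare_block_grid_alt (width : Int) (height : Int) (blocksize : Int) : List (Int × Int × Int × Int) :=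
  let nx : Int := ((PySem.List.pyRange 0 width blocksize).length : Int)
  let ny : Int := ((PySem.List.pyRange 0 height blocksize).length : Int)
  (PySem.List.pyRange 0 (nx * ny) 1).foldl (fun blocks k =>
    let j := PySem.Int.floordiv k nx
    let i := PySem.Int.mod k nx
    let x0 := i * blocksize
    let y0 := j * blocksize
    blocks ++ [(x0, min (x0 + blocksize) width, y0, min (y0 + blocksize) height)]) []

-- ===== PRECONDITION & SPEC =====
-- Pre_ excludes blocksize = 0, on which Python's range (used by both A and B) raises ValueError.
def Pre_prepare_block_grid (width : Int) (height : Int) (blocksize : Int) : Prop := blocksize ≠ 0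
instance (width : Int) (height : Int) (blocksize : Int) : Decidable (Pre_prepare_block_grid width height blocksize) := by unfold Pre_prepare_block_grid; infer_instance
def pvWitness_prepare_block_grid : Int × Int × Int := (5, 3, 2)

def Spec_prepare_block_grid (width : Int) (height : Int) (blocksize : Int) (out : List (Int × Int × Int × Int)) : Prop := out = prepare_block_grid_alt width height blocksize
instance (width : Int) (height : Int) (blocksize : Int) (out : List (Int × Int × Int × Int)) : Decidable (Spec_prepare_block_grid width height blocksize out) := by unfold Spec_prepare_block_grid; infer_instance

-- ===== CLAIM (what is proved, stated in full; the proofs are below) =====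
def Claim_equal_prepare_block_grid : Prop := ∀ (width : Int) (height : Int) (blocksize : Int), Dom_prepare_block_grid width height blocksize → Pre_prepare_block_grid width height blocksize → Spec_prepare_block_grid width height blocksize (prepare_block_grid width height blocksize)

-- ===== LEMMAS AND PROOFS =====

-- pyRange starting at 0 is the map (b * ·) over List.range of its own length
theorem pv_pyRange_zero_eq_map (w b : Int) (hb : b ≠ 0) :
    PySem.List.pyRange 0 w b
      = (List.range (PySem.List.pyRange 0 w b).length).map (fun k : Nat => b * (k : Int)) := by
  simp [PySem.List.pyRange, hb]

-- flattening a flat divmod-indexed range into the nested product order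
theorem pv_range_mul_divmod {β : Type} (f : Nat → Nat → β) (nx : Nat) :
    ∀ ny : Nat,
      (List.range (nx * ny)).map (fun k => f (k % nx) (k / nx))
        = (List.range ny).flatMap (fun j => (List.range nx).map (fun i => f i j)) := by
  intro ny
  induction ny with
  | zero => simp
  | succ n ih =>
      rw [List.range_succ, Nat.mul_succ, List.range_add, List.map_append, ih]
      simp only [List.flatMap_append, List.flatMap_singleton, List.map_map]
      congr 1
      apply List.map_congr_left
      intro i hi
      have hilt : i < nx := List.mem_range.mp hi
      have h1 : (nx * n + i) % nx = i := by
        rw [Nat.add_comm, Nat.add_mul_mod_self_left]; exact Nat.mod_eq_of_lt hilt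
      have h2 : (nx * n + i) / nx = n := by
        rw [Nat.add_comm, Nat.add_mul_div_left _ _ ((by omega : 0 < nx)),
            Nat.div_eq_of_lt hilt]; omega
      simp [Function.comp, h1, h2]

-- ===== VERDICT (by name: the statement is the Claim_ definition above) =====
theorem prepare_block_grid_spec : Claim_equal_prepare_block_grid := by
  intro width height blocksize _ hb
  unfold Spec_prepare_block_grid prepare_block_grid prepare_block_grid_alt
  set Nx := (PySem.List.pyRange 0 width blocksize).length with hNx
  set Ny := (PySem.List.pyRange 0 height blocksize).length with hNy
  -- A side: nested folds become flatMap over the two ranges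
  have hinner : (fun (blocks : List (Int × Int × Int × Int)) (y0 : Int) =>
      (PySem.List.pyRange 0 width blocksize).foldl (fun blocks x0 =>
        blocks ++ [(x0, min (x0 + blocksize) width, y0, min (y0 + blocksize) height)]) blocks)
      = fun blocks y0 => blocks ++
        ((PySem.List.pyRange 0 width blocksize).map
          (fun x0 => (x0, min (x0 + blocksize) width, y0, min (y0 + blocksize) height))) := by
    funext blocks y0
    exact PySem.List.foldl_append_singleton_eq_map _ _ _
  simp only [hinner]
  rw [PySem.List.foldl_append_eq_flatMap]
  -- B side: flat fold becomes a map over List.range (Nx * Ny)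
  rw [PySem.List.pyRange_one 0 ((Nx : Int) * (Ny : Int)),
      PySem.List.foldl_append_singleton_eq_map]
  have hmul : (((Nx : Int) * (Ny : Int)) - 0).toNat = Nx * Ny := by
    omega
  rw [hmul]
  -- rewrite both pyRanges as maps over List.range
  rw [pv_pyRange_zero_eq_map width blocksize hb, pv_pyRange_zero_eq_map height blocksize hb,
      ← hNx, ← hNy]
  rw [List.flatMap_map]
  simp only [List.map_map, Function.comp_def, zero_add]
  simp only [List.nil_append]
  -- reduce Int divmod on casts to Nat divmod and fold the flat index back into (row, column)
  symm
  have hbody : ∀ k ∈ List.range (Nx * Ny),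
      ((PySem.Int.mod (k : Int) (Nx : Int)) * blocksize,
        min ((PySem.Int.mod (k : Int) (Nx : Int)) * blocksize + blocksize) width,
        (PySem.Int.floordiv (k : Int) (Nx : Int)) * blocksize,
        min ((PySem.Int.floordiv (k : Int) (Nx : Int)) * blocksize + blocksize) height)
      = (fun (i j : Nat) =>
          (blocksize * (i : Int), min (blocksize * (i : Int) + blocksize) width,
           blocksize * (j : Int), min (blocksize * (j : Int) + blocksize) height)) (k % Nx) (k / Nx) := by
    intro k _
    simp [PySem.Int.mod_natCast, PySem.Int.floordiv_natCast, Int.mul_comm]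
  rw [List.map_congr_left hbody]
  exact pv_range_mul_divmod (fun i j =>
    (blocksize * (i : Int), min (blocksize * (i : Int) + blocksize) width,
     blocksize * (j : Int), min (blocksize * (j : Int) + blocksize) height)) Nx Ny
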